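-- pv_equiv track=rewrite | github.com/ninepig/leecode_dd_2024 | zdd/hackrankPrac/dd/restaurantName.py | compareDifference
-- ===== SOURCE A (Python) =====
-- import collections
--
-- def compareDifference(target, candidate):
--     # memo = collections.defaultdict(int)
--     # for char in candidate:
--     #     memo[char] += 1
--     # for char in target_counter:
--     #     if memo[char]:
--     #         memo[char] -=1
--     # return sum(memo.values())
--     scount = collections.Counter(candidate)
--     tcount = collections.Counter(target)
--     count = 0
--     for ch in scount:
--         count += max(scount[ch] - tcount[ch], 0)  # We only add positive differences
--     for ch in tcount:
--         count += max(tcount[ch] - scount[ch], 0)  # We only add positive differences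
--     return count // 2
-- ===== SOURCE B (Python) =====
-- import collections
--
-- def compareDifference(target, candidate):
--     tcount = collections.Counter(target)
--     ccount = collections.Counter(candidate)
--     matched = sum(min(cnt, ccount[ch]) for ch, cnt in tcount.items())
--     return (len(target) + len(candidate)) // 2 - matched
-- ===== Notes on version B (the rewrite author's own statement) =====
-- stated objective: alternative
-- what changed: Replaces the two positive-difference summation loops over both counters by one multiset-matching pass (matched characters common to both strings) and the length formula (len(target)+len(candidate))//2 - matched.
import Mathlib
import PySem

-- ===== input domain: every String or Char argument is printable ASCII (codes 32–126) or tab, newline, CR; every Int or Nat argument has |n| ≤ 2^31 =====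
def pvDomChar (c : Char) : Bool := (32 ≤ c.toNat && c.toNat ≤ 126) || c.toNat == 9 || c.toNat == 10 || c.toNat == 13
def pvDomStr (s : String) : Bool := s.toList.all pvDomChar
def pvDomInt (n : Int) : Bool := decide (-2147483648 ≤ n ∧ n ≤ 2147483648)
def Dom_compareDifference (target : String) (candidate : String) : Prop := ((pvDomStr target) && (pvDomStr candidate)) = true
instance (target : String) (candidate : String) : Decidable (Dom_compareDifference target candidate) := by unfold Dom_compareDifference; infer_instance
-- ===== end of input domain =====

-- B computes the number of matched characters (multiset intersection) in one pass and
-- returns (len(target)+len(candidate))//2 - matched, instead of A's two positive-difference loops.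

-- ===== PORT A =====
def compareDifference (target : String) (candidate : String) : Int :=
  let scount := PySem.Dict.counter candidate.toList
  let tcount := PySem.Dict.counter target.toList
  let count : Int :=
    scount.keys.foldl (fun acc ch => acc + max (scount.getD ch 0 - tcount.getD ch 0) 0) 0
  let count :=
    tcount.keys.foldl (fun acc ch => acc + max (tcount.getD ch 0 - scount.getD ch 0) 0) count
  PySem.Int.floordiv count 2

-- ===== PORT B =====
def compareDifference_alt (target : String) (candidate : String) : Int :=
  let tcount := PySem.Dict.counter target.toList
  let ccount := PySem.Dict.counter candidate.toList
  let matched : Int :=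
    tcount.items.foldl (fun acc p => acc + min p.2 (ccount.getD p.1 0)) 0
  PySem.Int.floordiv (PySem.Str.len target + PySem.Str.len candidate) 2 - matched

-- ===== PRECONDITION & SPEC =====
def Spec_compareDifference (target : String) (candidate : String) (out : Int) : Prop := out = compareDifference_alt target candidate
instance (target : String) (candidate : String) (out : Int) : Decidable (Spec_compareDifference target candidate out) := by unfold Spec_compareDifference; infer_instance

-- ===== CLAIM (what is proved, stated in full; the proofs are below) =====
def Claim_equal_compareDifference : Prop := ∀ (target : String) (candidate : String), Dom_compareDifference target candidate → Spec_compareDifference target candidate (compareDifference target candidate)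

-- ===== LEMMAS AND PROOFS =====

-- sum of h over the distinct elements of l, as a Finset sum
theorem sum_map_ofList (l : List Char) (h : Char → Int) :
    ((PySem.Set.ofList l).map h).sum = ∑ x ∈ l.toFinset, h x := by
  have hnd : (PySem.Set.ofList l).Nodup := PySem.Set.nodup_ofList l
  have hfe : (PySem.Set.ofList l).toFinset = l.toFinset := by
    apply Finset.ext
    intro a
    simp [List.mem_toFinset, PySem.Set.mem_ofList]
  rw [← List.sum_toFinset h hnd, hfe]

theorem sum_count_int (l : List Char) :
    (∑ x ∈ l.toFinset, (l.count x : Int)) = (l.length : Int) := by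
  have h : ∑ x ∈ l.toFinset, l.count x = l.length := by
    simpa using Multiset.toFinset_sum_count_eq (l : Multiset Char)
  rw [← Nat.cast_sum, h]

-- extend a sum over l.toFinset to a superset F when h vanishes off l.toFinset
theorem sum_extend (l : List Char) (F : Finset Char) (h : Char → Int)
    (hsub : l.toFinset ⊆ F) (hz : ∀ x ∈ F, x ∉ l.toFinset → h x = 0) :
    (∑ x ∈ l.toFinset, h x) = ∑ x ∈ F, h x :=
  Finset.sum_subset hsub hz

theorem compareDifference_spec_aux (target candidate : String) :
    compareDifference target candidate = compareDifference_alt target candidate := by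
  unfold compareDifference compareDifference_alt
  simp only [PySem.Dict.keys_counter, PySem.Dict.items_counter, PySem.Dict.getD_counter,
    PySem.List.foldl_add, PySem.Str.len_eq]
  set t := target.toList with ht
  set c := candidate.toList with hc
  set F : Finset Char := t.toFinset ∪ c.toFinset with hF
  have hcnt0t : ∀ x, x ∉ t.toFinset → (t.count x : Int) = 0 := by
    intro x hx; simp_all [List.mem_toFinset, List.count_eq_zero]
  have hcnt0c : ∀ x, x ∉ c.toFinset → (c.count x : Int) = 0 := by
    intro x hx; simp_all [List.mem_toFinset, List.count_eq_zero]
  -- the three sums, as sums over F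
  have hS1 : ((PySem.Set.ofList c).map (fun ch => max ((c.count ch : Int) - (t.count ch : Int)) 0)).sum
      = ∑ x ∈ F, max ((c.count x : Int) - (t.count x : Int)) 0 := by
    rw [sum_map_ofList]
    exact sum_extend c F _ Finset.subset_union_right
      (fun x _ hx => by have := hcnt0c x hx; omega)
  have hS2 : ((PySem.Set.ofList t).map (fun ch => max ((t.count ch : Int) - (c.count ch : Int)) 0)).sum
      = ∑ x ∈ F, max ((t.count x : Int) - (c.count x : Int)) 0 := by
    rw [sum_map_ofList]
    exact sum_extend t F _ Finset.subset_union_left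
      (fun x _ hx => by have := hcnt0t x hx; omega)
  have hM : (((PySem.Set.ofList t).map (fun k => (k, (t.count k : Int)))).map
        (fun p => min p.2 ((c.count p.1 : Int)))).sum
      = ∑ x ∈ F, min (t.count x : Int) (c.count x : Int) := by
    rw [List.map_map]
    have : ((fun p : Char × Int => min p.2 ((c.count p.1 : Int))) ∘ fun k => (k, (t.count k : Int)))
        = fun k => min (t.count k : Int) (c.count k : Int) := rfl
    rw [this, sum_map_ofList]
    exact sum_extend t F _ Finset.subset_union_left
      (fun x _ hx => by have := hcnt0t x hx; omega)
  -- lengths as sums over F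
  have hLt : (t.length : Int) = ∑ x ∈ F, (t.count x : Int) := by
    rw [← sum_count_int t]
    exact sum_extend t F _ Finset.subset_union_left (fun x _ hx => hcnt0t x hx)
  have hLc : (c.length : Int) = ∑ x ∈ F, (c.count x : Int) := by
    rw [← sum_count_int c]
    exact sum_extend c F _ Finset.subset_union_right (fun x _ hx => hcnt0c x hx)
  rw [hS1, hS2, hM]
  -- pointwise identity summed over F
  have key : (∑ x ∈ F, max ((c.count x : Int) - (t.count x : Int)) 0)
      + (∑ x ∈ F, max ((t.count x : Int) - (c.count x : Int)) 0)
      = (t.length : Int) + (c.length : Int)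
        - 2 * ∑ x ∈ F, min (t.count x : Int) (c.count x : Int) := by
    rw [hLt, hLc, ← Finset.sum_add_distrib, ← Finset.sum_add_distrib, Finset.mul_sum,
      ← Finset.sum_sub_distrib]
    exact Finset.sum_congr rfl (fun x _ => by omega)
  rw [PySem.Int.floordiv_eq_ediv_of_pos (by omega), PySem.Int.floordiv_eq_ediv_of_pos (by omega)]
  omega

-- ===== VERDICT (by name: the statement is the Claim_ definition above) =====
theorem compareDifference_spec : Claim_equal_compareDifference := by
  intro target candidate _
  exact compareDifference_spec_aux target candidate
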